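-- pv_equiv track=rewrite | github.com/RavilkaDev0/RavilBuy | Login.py | extract_accounts
-- ===== SOURCE A (Python) =====
-- from typing import Dict, List, Optional, Tuple
--
-- def extract_accounts(env: Dict[str, str]) -> Dict[str, Dict[str, str]]:
--     accounts: Dict[str, Dict[str, str]] = {}
--     for key, value in env.items():
--         if not key.endswith("_LOGIN"):
--             continue
--         prefix = key[:-6]
--         password_key = f"{prefix}_PASSWORD"
--         password = env.get(password_key)
--         if password:
--             accounts[prefix] = {"login": value, "password": password}
--     return accounts
-- ===== SOURCE B (Python) =====
-- def extract_accounts(env):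
--     logins = {}
--     passwords = {}
--     for key, value in env.items():
--         if key.endswith("_LOGIN"):
--             logins[key[:-6]] = value
--         elif key.endswith("_PASSWORD"):
--             passwords[key[:-9]] = value
--     accounts = {}
--     for prefix, login in logins.items():
--         password = passwords.get(prefix)
--         if password:
--             accounts[prefix] = {"login": login, "password": password}
--     return accounts
-- ===== Notes on version B (the rewrite author's own statement) =====
-- stated objective: alternative
-- what changed: B builds two prefix-keyed index dicts (logins and passwords) in one pass and then joins them by iterating the login index, instead of A's single pass that looks up '<prefix>_PASSWORD' in env inline for each login key.
import Mathlib
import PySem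

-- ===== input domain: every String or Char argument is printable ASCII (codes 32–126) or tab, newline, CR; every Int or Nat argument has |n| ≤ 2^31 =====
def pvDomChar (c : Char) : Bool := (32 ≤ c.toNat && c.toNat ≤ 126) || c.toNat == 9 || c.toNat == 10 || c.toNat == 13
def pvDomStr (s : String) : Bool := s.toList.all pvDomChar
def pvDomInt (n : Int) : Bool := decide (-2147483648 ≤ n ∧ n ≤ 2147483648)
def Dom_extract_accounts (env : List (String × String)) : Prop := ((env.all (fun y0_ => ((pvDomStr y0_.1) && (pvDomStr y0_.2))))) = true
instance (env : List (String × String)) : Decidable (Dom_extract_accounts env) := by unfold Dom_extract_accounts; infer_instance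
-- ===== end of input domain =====

-- B replaces A's inline env lookup of "<prefix>_PASSWORD" during the scan by an index-then-join
-- structure: one pass builds two prefix-keyed dicts (logins / passwords), a second pass joins them
-- (objective: alternative decomposition, same linear cost in Python).

-- ===== PORT A =====
def extract_accounts (env : List (String × String)) : List (String × List (String × String)) :=
  (env.foldl (fun (accounts : PySem.Dict String (List (String × String))) kv =>
      if PySem.Str.endswith kv.1 "_LOGIN" then
        let pre := PySem.Str.slice kv.1 none (some (-6))
        match (PySem.Dict.mk env).get? (pre ++ "_PASSWORD") with
        | some password =>
            if password ≠ "" then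
              accounts.insert pre [("login", kv.2), ("password", password)]
            else accounts
        | none => accounts
      else accounts) PySem.Dict.empty).items

-- ===== PORT B =====
def extract_accounts_alt (env : List (String × String)) : List (String × List (String × String)) :=
  let lp :=
    env.foldl (fun (st : PySem.Dict String String × PySem.Dict String String) kv =>
      if PySem.Str.endswith kv.1 "_LOGIN" then
        (st.1.insert (PySem.Str.slice kv.1 none (some (-6))) kv.2, st.2)
      else if PySem.Str.endswith kv.1 "_PASSWORD" then
        (st.1, st.2.insert (PySem.Str.slice kv.1 none (some (-9))) kv.2)
      else st) (PySem.Dict.empty, PySem.Dict.empty)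
  (lp.1.items.foldl (fun (accounts : PySem.Dict String (List (String × String))) pl =>
      match lp.2.get? pl.1 with
      | some password =>
          if password ≠ "" then
            accounts.insert pl.1 [("login", pl.2), ("password", password)]
          else accounts
      | none => accounts) PySem.Dict.empty).items

-- ===== PRECONDITION & SPEC =====
-- Pre_ excludes association lists with duplicate keys: such an input cannot arise from the Python
-- dict argument (a dict has unique keys), and on it the list model's first-match lookup order is accidental.
def Pre_extract_accounts (env : List (String × String)) : Prop := (env.map Prod.fst).Nodup
instance (env : List (String × String)) : Decidable (Pre_extract_accounts env) := by unfold Pre_extract_accounts; infer_instance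
def pvWitness_extract_accounts : (List (String × String)) := [("A_LOGIN", "u"), ("A_PASSWORD", "p")]

def Spec_extract_accounts (env : List (String × String)) (out : List (String × List (String × String))) : Prop := out = extract_accounts_alt env
instance (env : List (String × String)) (out : List (String × List (String × String))) : Decidable (Spec_extract_accounts env out) := by unfold Spec_extract_accounts; infer_instance

-- ===== CLAIM (what is proved, stated in full; the proofs are below) =====
def Claim_equal_extract_accounts : Prop := ∀ (env : List (String × String)), Dom_extract_accounts env → Pre_extract_accounts env → Spec_extract_accounts env (extract_accounts env)

-- ===== LEMMAS AND PROOFS =====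

-- abbreviations used only by the proofs
def kvP (kv : String × String) : Bool := PySem.Str.endswith kv.1 "_LOGIN"
def kvQ (kv : String × String) : Bool := !PySem.Str.endswith kv.1 "_LOGIN" && PySem.Str.endswith kv.1 "_PASSWORD"
def pre6 (kv : String × String) : String := PySem.Str.slice kv.1 none (some (-6))
def pre9 (kv : String × String) : String := PySem.Str.slice kv.1 none (some (-9))
def pwDict (env : List (String × String)) : PySem.Dict String String :=
  PySem.Dict.mk ((env.filter kvQ).map (fun kv => (pre9 kv, kv.2)))
def wA (env : List (String × String)) (p : String) : String :=
  (PySem.Dict.mk env).getD (p ++ "_PASSWORD") ""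

-- string facts: removing / re-attaching the literal suffixes
lemma split6 {s : String} (h : PySem.Str.endswith s "_LOGIN" = true) :
    PySem.Str.slice s none (some (-6)) ++ "_LOGIN" = s := by
  apply String.toList_inj.mp
  have hb : "_LOGIN".toList <:+ s.toList := by
    exact (PySem.Chars.endswith_iff _ _).mp (by simpa [PySem.Str.endswith] using h)
  obtain ⟨u, hu⟩ := hb
  have hsl : (PySem.Str.slice s none (some (-6))).toList = s.toList.take (s.toList.length - 6) := by
    simp [pysem, PySem.List.slice_to_neg_ofNat _ 6 (by omega)]
  rw [String.toList_append, hsl, ← hu]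
  have hlen : (u ++ "_LOGIN".toList).length - 6 = u.length := by simp
  rw [hlen, List.take_left]

lemma split9 {s : String} (h : PySem.Str.endswith s "_PASSWORD" = true) :
    PySem.Str.slice s none (some (-9)) ++ "_PASSWORD" = s := by
  apply String.toList_inj.mp
  have hb : "_PASSWORD".toList <:+ s.toList := by
    exact (PySem.Chars.endswith_iff _ _).mp (by simpa [PySem.Str.endswith] using h)
  obtain ⟨u, hu⟩ := hb
  have hsl : (PySem.Str.slice s none (some (-9))).toList = s.toList.take (s.toList.length - 9) := by
    simp [pysem, PySem.List.slice_to_neg_ofNat _ 9 (by omega)]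
  rw [String.toList_append, hsl, ← hu]
  have hlen : (u ++ "_PASSWORD".toList).length - 9 = u.length := by simp
  rw [hlen, List.take_left]

lemma slice9_append (p : String) :
    PySem.Str.slice (p ++ "_PASSWORD") none (some (-9)) = p := by
  apply String.toList_inj.mp
  have hsl : (PySem.Str.slice (p ++ "_PASSWORD") none (some (-9))).toList
      = (p ++ "_PASSWORD").toList.take ((p ++ "_PASSWORD").toList.length - 9) := by
    simp [pysem, PySem.List.slice_to_neg_ofNat _ 9 (by omega)]
  rw [hsl, String.toList_append]
  have hlen : (p.toList ++ "_PASSWORD".toList).length - 9 = p.toList.length := by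
    simp only [List.length_append, show ("_PASSWORD".toList).length = 9 from rfl]
    omega
  rw [hlen, List.take_left]

lemma ends_pw (p : String) : PySem.Str.endswith (p ++ "_PASSWORD") "_PASSWORD" = true := by
  have hb : "_PASSWORD".toList <:+ (p ++ "_PASSWORD").toList := by
    rw [String.toList_append]; exact ⟨p.toList, rfl⟩
  simpa [PySem.Str.endswith] using (PySem.Chars.endswith_iff _ _).mpr hb

lemma not_ends_login (p : String) : PySem.Str.endswith (p ++ "_PASSWORD") "_LOGIN" = false := by
  refine Bool.eq_false_iff.mpr ?_
  intro hT
  have hb : "_LOGIN".toList <:+ (p ++ "_PASSWORD").toList := by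
    exact (PySem.Chars.endswith_iff _ _).mp (by simpa [PySem.Str.endswith] using hT)
  rw [String.toList_append] at hb
  obtain ⟨u, hu⟩ := hb
  have hlu : u.length = p.toList.length + 3 := by
    have hl := congrArg List.length hu
    simp only [List.length_append, show ("_LOGIN".toList).length = 6 from rfl,
      show ("_PASSWORD".toList).length = 9 from rfl] at hl
    omega
  have hd := congrArg (List.drop u.length) hu
  rw [List.drop_left, hlu, List.drop_append] at hd
  have hnil : List.drop (p.toList.length + 3 - p.toList.length) "_PASSWORD".toList = ['S', 'S', 'W', 'O', 'R', 'D'] := by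
    have h3 : p.toList.length + 3 - p.toList.length = 3 := by omega
    rw [h3]
    decide
  have hnil2 : List.drop (p.toList.length + 3) p.toList = [] := by
    apply List.drop_eq_nil_of_le; omega
  rw [hnil, hnil2, List.nil_append] at hd
  exact absurd hd (by decide)

-- keys stay distinct after stripping a common suffix
lemma nodup_map_pre {l : List (String × String)} (sfx : String) (pre : (String × String) → String)
    (hpre : ∀ kv ∈ l, pre kv ++ sfx = kv.1) (hnd : (l.map Prod.fst).Nodup) :
    (l.map pre).Nodup := by
  refine List.Nodup.map_on ?_ (List.Nodup.of_map _ hnd)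
  intro x hx y hy hxy
  have hkey : x.1 = y.1 := by rw [← hpre x hx, ← hpre y hy, hxy]
  exact List.inj_on_of_nodup_map hnd hx hy hkey

-- A in normal form
lemma A_char (env : List (String × String)) (hnd : (env.map Prod.fst).Nodup) :
    extract_accounts env =
      ((env.filter kvP).filter (fun kv => decide (wA env (pre6 kv) ≠ ""))).map
        (fun kv => (pre6 kv, [("login", kv.2), ("password", wA env (pre6 kv))])) := by
  unfold extract_accounts
  have hcongr := PySem.List.foldl_congr_mem env
    (fun (accounts : PySem.Dict String (List (String × String))) kv =>
      if PySem.Str.endswith kv.1 "_LOGIN" then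
        let pre := PySem.Str.slice kv.1 none (some (-6))
        match (PySem.Dict.mk env).get? (pre ++ "_PASSWORD") with
        | some password =>
            if password ≠ "" then
              accounts.insert pre [("login", kv.2), ("password", password)]
            else accounts
        | none => accounts
      else accounts)
    (fun (accounts : PySem.Dict String (List (String × String))) kv =>
      if kvP kv = true then
        (if wA env (pre6 kv) ≠ "" then
          accounts.insert (pre6 kv) [("login", kv.2), ("password", wA env (pre6 kv))]
        else accounts)
      else accounts)
    PySem.Dict.empty
    (fun acc kv _ => by
      beta_reduce
      simp only [kvP]
      by_cases hP : PySem.Str.endswith kv.1 "_LOGIN" = true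
      · rw [if_pos hP, if_pos hP]
        show (match (PySem.Dict.mk env).get? (pre6 kv ++ "_PASSWORD") with
              | some password =>
                  if password ≠ "" then
                    acc.insert (pre6 kv) [("login", kv.2), ("password", password)]
                  else acc
              | none => acc) = _
        rcases hg : (PySem.Dict.mk env).get? (pre6 kv ++ "_PASSWORD") with _ | pw
        · have hw : wA env (pre6 kv) = "" := by
            simp [wA, PySem.Dict.getD_eq_get?_getD, hg]
          simp [hw]
        · have hw : wA env (pre6 kv) = pw := by
            simp [wA, PySem.Dict.getD_eq_get?_getD, hg]
          simp [hw]
      · rw [if_neg hP, if_neg hP])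
  rw [hcongr]
  rw [PySem.List.foldl_if_eq_foldl_filter kvP]
  rw [PySem.List.foldl_ite_eq_foldl_filter (fun kv => wA env (pre6 kv) ≠ "")]
  rw [PySem.Dict.items_foldl_insert_fresh _ (fun kv => pre6 kv)
      (fun kv => [("login", kv.2), ("password", wA env (pre6 kv))]) PySem.Dict.empty
      (fun a _ => PySem.Dict.contains_empty _) ?nd]
  · show [] ++ _ = _
    rw [List.nil_append]
  case nd =>
    apply nodup_map_pre "_LOGIN"
    · intro kv hkv
      have hP : kvP kv = true := (List.mem_filter.mp (List.mem_filter.mp hkv).1).2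
      exact split6 hP
    · have hsub : ((env.filter kvP).filter (fun kv => decide (wA env (pre6 kv) ≠ ""))).Sublist env :=
        List.Sublist.trans List.filter_sublist List.filter_sublist
      exact List.Nodup.sublist (hsub.map Prod.fst) hnd

-- the password index looks up exactly what A's inline env.get looks up
lemma pw_lookup (env : List (String × String)) (hnd : (env.map Prod.fst).Nodup) (p : String) :
    (pwDict env).get? p = (PySem.Dict.mk env).get? (p ++ "_PASSWORD") := by
  apply Option.ext
  intro v
  have hkE : (PySem.Dict.mk env).keys.Nodup := hnd
  have hkP : (pwDict env).keys.Nodup := by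
    show (((env.filter kvQ).map (fun kv => (pre9 kv, kv.2))).map Prod.fst).Nodup
    rw [List.map_map]
    apply nodup_map_pre "_PASSWORD"
    · intro kv hkv
      have hq : kvQ kv = true := (List.mem_filter.mp hkv).2
      have h9 : PySem.Str.endswith kv.1 "_PASSWORD" = true := by
        simp [kvQ] at hq; exact hq.2
      exact split9 h9
    · exact List.Nodup.sublist (List.filter_sublist.map Prod.fst) hnd
  rw [PySem.Dict.get?_eq_some_iff_mem_items _ _ _ hkP,
      PySem.Dict.get?_eq_some_iff_mem_items _ _ _ hkE]
  show (p, v) ∈ (env.filter kvQ).map (fun kv => (pre9 kv, kv.2)) ↔ (p ++ "_PASSWORD", v) ∈ env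
  constructor
  · intro h
    obtain ⟨kv, hkv, heq⟩ := List.mem_map.mp h
    obtain ⟨hkvE, hq⟩ := List.mem_filter.mp hkv
    have h9 : PySem.Str.endswith kv.1 "_PASSWORD" = true := by
      simp [kvQ] at hq; exact hq.2
    have h1 : pre9 kv = p := congrArg Prod.fst heq
    have h2 : kv.2 = v := congrArg Prod.snd heq
    have hk : kv.1 = p ++ "_PASSWORD" := by
      rw [← split9 h9]
      show pre9 kv ++ "_PASSWORD" = p ++ "_PASSWORD"
      rw [h1]
    have hkv' : kv = (p ++ "_PASSWORD", v) := Prod.ext hk h2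
    rwa [← hkv']
  · intro h
    refine List.mem_map.mpr ⟨(p ++ "_PASSWORD", v), List.mem_filter.mpr ⟨h, ?_⟩, ?_⟩
    · show (!PySem.Str.endswith (p ++ "_PASSWORD") "_LOGIN" &&
          PySem.Str.endswith (p ++ "_PASSWORD") "_PASSWORD") = true
      rw [ends_pw, not_ends_login]
      decide
    · show (pre9 (p ++ "_PASSWORD", v), v) = (p, v)
      rw [show pre9 (p ++ "_PASSWORD", v) = PySem.Str.slice (p ++ "_PASSWORD") none (some (-9)) from rfl,
          slice9_append]

-- B's first pass, split into its two independent accumulators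
lemma fold_split (env : List (String × String)) :
    env.foldl (fun (st : PySem.Dict String String × PySem.Dict String String) kv =>
      if PySem.Str.endswith kv.1 "_LOGIN" then
        (st.1.insert (PySem.Str.slice kv.1 none (some (-6))) kv.2, st.2)
      else if PySem.Str.endswith kv.1 "_PASSWORD" then
        (st.1, st.2.insert (PySem.Str.slice kv.1 none (some (-9))) kv.2)
      else st) (PySem.Dict.empty, PySem.Dict.empty)
    = (env.foldl (fun l kv => if kvP kv = true then l.insert (pre6 kv) kv.2 else l) PySem.Dict.empty,
       env.foldl (fun d kv => if kvQ kv = true then d.insert (pre9 kv) kv.2 else d) PySem.Dict.empty) := by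
  have hcongr := PySem.List.foldl_congr_mem env
    (fun (st : PySem.Dict String String × PySem.Dict String String) kv =>
      if PySem.Str.endswith kv.1 "_LOGIN" then
        (st.1.insert (PySem.Str.slice kv.1 none (some (-6))) kv.2, st.2)
      else if PySem.Str.endswith kv.1 "_PASSWORD" then
        (st.1, st.2.insert (PySem.Str.slice kv.1 none (some (-9))) kv.2)
      else st)
    (fun (st : PySem.Dict String String × PySem.Dict String String) kv =>
      ((fun l kv => if kvP kv = true then PySem.Dict.insert l (pre6 kv) kv.2 else l) st.1 kv,
       (fun d kv => if kvQ kv = true then PySem.Dict.insert d (pre9 kv) kv.2 else d) st.2 kv))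
    (PySem.Dict.empty, PySem.Dict.empty)
    (fun st kv _ => by
      beta_reduce
      cases h1 : PySem.Str.endswith kv.1 "_LOGIN" <;>
        cases h2 : PySem.Str.endswith kv.1 "_PASSWORD" <;>
          simp only [kvP, kvQ, pre6, pre9, h1, h2, Bool.not_true, Bool.not_false,
            Bool.false_and, Bool.true_and, Bool.and_true, Bool.and_false, if_true, if_false,
            Bool.false_eq_true, Bool.true_eq_false, ite_true, ite_false])
  rw [hcongr]
  rw [PySem.List.foldl_prod_mk
    (f := fun l kv => if kvP kv = true then PySem.Dict.insert l (pre6 kv) kv.2 else l)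
    (g := fun d kv => if kvQ kv = true then PySem.Dict.insert d (pre9 kv) kv.2 else d)]

-- B's logins index, as a list
lemma logins_items (env : List (String × String)) (hnd : (env.map Prod.fst).Nodup) :
    (env.foldl (fun l kv => if kvP kv = true then l.insert (pre6 kv) kv.2 else l)
        PySem.Dict.empty).items
      = (env.filter kvP).map (fun kv => (pre6 kv, kv.2)) := by
  rw [PySem.List.foldl_if_eq_foldl_filter kvP]
  rw [PySem.Dict.items_foldl_insert_fresh _ (fun kv => pre6 kv) (fun kv => kv.2) PySem.Dict.empty
      (fun a _ => PySem.Dict.contains_empty _) ?nd]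
  · show [] ++ _ = _
    rw [List.nil_append]
  case nd =>
    apply nodup_map_pre "_LOGIN"
    · intro kv hkv
      exact split6 (List.mem_filter.mp hkv).2
    · exact List.Nodup.sublist (List.filter_sublist.map Prod.fst) hnd

-- B's passwords index is pwDict
lemma pw_fold (env : List (String × String)) (hnd : (env.map Prod.fst).Nodup) :
    env.foldl (fun d kv => if kvQ kv = true then d.insert (pre9 kv) kv.2 else d)
        PySem.Dict.empty
      = pwDict env := by
  apply PySem.Dict.ext
  rw [PySem.List.foldl_if_eq_foldl_filter kvQ]
  rw [PySem.Dict.items_foldl_insert_fresh _ (fun kv => pre9 kv) (fun kv => kv.2) PySem.Dict.empty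
      (fun a _ => PySem.Dict.contains_empty _) ?nd]
  · show [] ++ _ = (pwDict env).items
    rw [List.nil_append]
    rfl
  case nd =>
    apply nodup_map_pre "_PASSWORD"
    · intro kv hkv
      have hq : kvQ kv = true := (List.mem_filter.mp hkv).2
      have h9 : PySem.Str.endswith kv.1 "_PASSWORD" = true := by
        simp [kvQ] at hq; exact hq.2
      exact split9 h9
    · exact List.Nodup.sublist (List.filter_sublist.map Prod.fst) hnd

-- B in the same normal form
lemma B_char (env : List (String × String)) (hnd : (env.map Prod.fst).Nodup) :
    extract_accounts_alt env =
      ((env.filter kvP).filter (fun kv => decide (wA env (pre6 kv) ≠ ""))).map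
        (fun kv => (pre6 kv, [("login", kv.2), ("password", wA env (pre6 kv))])) := by
  have hW : ∀ q, (pwDict env).getD q "" = wA env q := fun q => by
    rw [wA, PySem.Dict.getD_eq_get?_getD, PySem.Dict.getD_eq_get?_getD, pw_lookup env hnd q]
  show (((env.foldl (fun (st : PySem.Dict String String × PySem.Dict String String) kv =>
      if PySem.Str.endswith kv.1 "_LOGIN" then
        (st.1.insert (PySem.Str.slice kv.1 none (some (-6))) kv.2, st.2)
      else if PySem.Str.endswith kv.1 "_PASSWORD" then
        (st.1, st.2.insert (PySem.Str.slice kv.1 none (some (-9))) kv.2)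
      else st) (PySem.Dict.empty, PySem.Dict.empty))).1.items.foldl
      (fun (accounts : PySem.Dict String (List (String × String))) pl =>
        match ((env.foldl (fun (st : PySem.Dict String String × PySem.Dict String String) kv =>
          if PySem.Str.endswith kv.1 "_LOGIN" then
            (st.1.insert (PySem.Str.slice kv.1 none (some (-6))) kv.2, st.2)
          else if PySem.Str.endswith kv.1 "_PASSWORD" then
            (st.1, st.2.insert (PySem.Str.slice kv.1 none (some (-9))) kv.2)
          else st) (PySem.Dict.empty, PySem.Dict.empty))).2.get? pl.1 with
        | some password =>
            if password ≠ "" then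
              accounts.insert pl.1 [("login", pl.2), ("password", password)]
            else accounts
        | none => accounts) PySem.Dict.empty).items = _
  rw [fold_split env]
  show (((env.foldl (fun l kv => if kvP kv = true then l.insert (pre6 kv) kv.2 else l)
      PySem.Dict.empty).items).foldl
      (fun (accounts : PySem.Dict String (List (String × String))) pl =>
        match (env.foldl (fun d kv => if kvQ kv = true then d.insert (pre9 kv) kv.2 else d)
            PySem.Dict.empty).get? pl.1 with
        | some password =>
            if password ≠ "" then
              accounts.insert pl.1 [("login", pl.2), ("password", password)]
            else accounts
        | none => accounts) PySem.Dict.empty).items = _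
  rw [pw_fold env hnd, logins_items env hnd]
  have hcongr := PySem.List.foldl_congr_mem ((env.filter kvP).map (fun kv => (pre6 kv, kv.2)))
    (fun (accounts : PySem.Dict String (List (String × String))) pl =>
      match (pwDict env).get? pl.1 with
      | some password =>
          if password ≠ "" then
            accounts.insert pl.1 [("login", pl.2), ("password", password)]
          else accounts
      | none => accounts)
    (fun (accounts : PySem.Dict String (List (String × String))) pl =>
      if wA env pl.1 ≠ "" then
        accounts.insert pl.1 [("login", pl.2), ("password", wA env pl.1)]
      else accounts)
    PySem.Dict.empty
    (fun acc pl _ => by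
      beta_reduce
      rcases hg : (pwDict env).get? pl.1 with _ | pw
      · have hw : wA env pl.1 = "" := by
          rw [← hW pl.1, PySem.Dict.getD_eq_get?_getD, hg]; rfl
        simp [hw]
      · have hw : wA env pl.1 = pw := by
          rw [← hW pl.1, PySem.Dict.getD_eq_get?_getD, hg]; rfl
        simp [hw])
  rw [hcongr]
  rw [PySem.List.foldl_ite_eq_foldl_filter (fun pl : String × String => wA env pl.1 ≠ "")]
  rw [PySem.Dict.items_foldl_insert_fresh
      (((env.filter kvP).map (fun kv => (pre6 kv, kv.2))).filter
        (fun pl => decide (wA env pl.1 ≠ "")))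
      (fun pl : String × String => pl.1)
      (fun pl : String × String => [("login", pl.2), ("password", wA env pl.1)]) PySem.Dict.empty
      (fun a _ => PySem.Dict.contains_empty _) ?nd]
  · show [] ++ _ = _
    rw [List.nil_append, List.filter_map, List.map_map]
    rfl
  case nd =>
    have hnodupL : ((env.filter kvP).map pre6).Nodup := by
      apply nodup_map_pre "_LOGIN"
      · intro kv hkv
        exact split6 (List.mem_filter.mp hkv).2
      · exact List.Nodup.sublist (List.filter_sublist.map Prod.fst) hnd
    refine List.Nodup.sublist (List.filter_sublist.map (fun pl : String × String => pl.1)) ?_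
    rw [List.map_map]
    simpa [Function.comp] using hnodupL

-- ===== VERDICT (by name: the statement is the Claim_ definition above) =====
theorem extract_accounts_spec : Claim_equal_extract_accounts := by
  intro env _ hPre
  unfold Spec_extract_accounts
  rw [A_char env hPre, B_char env hPre]
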